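-- pv_equiv track=rewrite | github.com/namanko/BBL434_26 | LAB2/kmer_enrichment.py | Signal_Checker
-- ===== SOURCE A (Python) =====
-- def Signal_Checker(genome,L,k,step):
--   freq = []
--   coords = []
--   for i in range(0,len(genome)-L,step): #Checking all windows
--     window = genome[i:i+L]
--     kmer_w = {} # Kmer count dictionary for current window
--     for j in range(len(window)-k):
--       curr_k = window[j:j+k]
--       if curr_k in kmer_w:
--         kmer_w[curr_k] +=1
--       else:
--         kmer_w[curr_k] = 1
--     m =  max(kmer_w.values()) # Frequency of most frequent kmer in this window
--     x = i + (L//2) # Position of most frequent kmer in this window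
--     freq.append(m)
--     coords.append(x)
--   return freq,coords
-- ===== SOURCE B (Python) =====
-- def Signal_Checker(genome, L, k, step):
--     # Dictionary-free: sort each window's k-mers; the top k-mer frequency is the longest run.
--     freq = []
--     coords = []
--     for i in range(0, len(genome) - L, step):
--         window = genome[i:i+L]
--         kmers = sorted(window[j:j+k] for j in range(len(window) - k))
--         best = 0
--         run = 0
--         prev = None
--         for s in kmers:
--             if run > 0 and s == prev:
--                 run += 1
--             else:
--                 run = 1
--             prev = s
--             if run > best:
--                 best = run
--         freq.append(best)
--         coords.append(i + L // 2)
--     return freq, coords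
-- ===== Notes on version B (the rewrite author's own statement) =====
-- stated objective: alternative
-- what changed: B drops A's per-window hash-map counting entirely: it sorts each window's k-mer list and takes the longest run of equal neighbours as the top frequency
import Mathlib
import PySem

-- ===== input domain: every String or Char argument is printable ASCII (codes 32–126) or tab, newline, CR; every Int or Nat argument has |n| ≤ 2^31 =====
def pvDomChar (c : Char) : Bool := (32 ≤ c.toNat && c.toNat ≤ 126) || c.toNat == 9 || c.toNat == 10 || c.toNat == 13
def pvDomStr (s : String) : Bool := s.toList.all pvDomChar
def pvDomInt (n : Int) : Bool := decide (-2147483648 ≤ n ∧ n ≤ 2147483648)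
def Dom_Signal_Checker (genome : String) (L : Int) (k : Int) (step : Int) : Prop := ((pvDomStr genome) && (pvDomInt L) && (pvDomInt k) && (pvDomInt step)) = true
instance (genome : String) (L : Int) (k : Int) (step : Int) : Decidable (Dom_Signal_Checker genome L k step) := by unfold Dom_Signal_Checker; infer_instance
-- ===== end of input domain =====

-- B replaces A's per-window hash-map counting by sorting the window's k-mers and
-- taking the longest run of equal ones (objective: alternative, dictionary-free).

-- ===== PORT A =====
def Signal_Checker (genome : String) (L : Int) (k : Int) (step : Int) : List Int × List Int :=
  (PySem.List.pyRange 0 (PySem.Str.len genome - L) step).foldl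
    (fun (acc : List Int × List Int) i =>
      let window : List Char := PySem.List.slice genome.toList (some i) (some (i + L))
      let kmerW : PySem.Dict (List Char) Int :=
        (PySem.List.pyRange 0 ((window.length : Int) - k) 1).foldl
          (fun d j =>
            let currK := PySem.List.slice window (some j) (some (j + k))
            if d.contains currK then d.insert currK (d.getD currK 0 + 1)
            else d.insert currK 1)
          PySem.Dict.empty
      -- max(kmer_w.values()): Python raises ValueError on an empty dict; Pre_ excludes that, 0 is a dummy default
      let m : Int := (PySem.List.max? kmerW.values (fun v => v)).getD 0
      let x : Int := i + PySem.Int.floordiv L 2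
      (acc.1 ++ [m], acc.2 ++ [x]))
    ([], [])

-- ===== PORT B =====
-- loop body of B's run-length scan: state (best, run, prev)
def pvScanStep (st : Int × Int × Option (List Char)) (s : List Char) : Int × Int × Option (List Char) :=
  let run : Int := if 0 < st.2.1 ∧ st.2.2 = some s then st.2.1 + 1 else 1
  let best : Int := if st.1 < run then run else st.1
  (best, run, some s)

def Signal_Checker_alt (genome : String) (L : Int) (k : Int) (step : Int) : List Int × List Int :=
  (PySem.List.pyRange 0 (PySem.Str.len genome - L) step).foldl
    (fun (acc : List Int × List Int) i =>
      let window : List Char := PySem.List.slice genome.toList (some i) (some (i + L))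
      let kmers : List (List Char) :=
        PySem.List.sorted ((PySem.List.pyRange 0 ((window.length : Int) - k) 1).map
          (fun j => PySem.List.slice window (some j) (some (j + k)))) (fun x => x) false
      let st := kmers.foldl pvScanStep (0, 0, none)
      (acc.1 ++ [st.1], acc.2 ++ [i + PySem.Int.floordiv L 2]))
    ([], [])

-- ===== PRECONDITION & SPEC =====
-- Pre_ excludes exactly the inputs where the Python A raises: step = 0 (range ValueError)
-- and windows whose k-mer list is empty, i.e. len(window) - k < 1 (max() on an empty dict, ValueError).
def Pre_Signal_Checker (genome : String) (L : Int) (k : Int) (step : Int) : Prop :=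
  step ≠ 0 ∧ ∀ i ∈ PySem.List.pyRange 0 (PySem.Str.len genome - L) step,
    k + 1 ≤ ((PySem.List.slice genome.toList (some i) (some (i + L))).length : Int)
instance (genome : String) (L : Int) (k : Int) (step : Int) : Decidable (Pre_Signal_Checker genome L k step) := by unfold Pre_Signal_Checker; infer_instance

def pvWitness_Signal_Checker : String × Int × Int × Int := ("ACGACGT", 4, 2, 1)

def Spec_Signal_Checker (genome : String) (L : Int) (k : Int) (step : Int) (out : List Int × List Int) : Prop := out = Signal_Checker_alt genome L k step
instance (genome : String) (L : Int) (k : Int) (step : Int) (out : List Int × List Int) : Decidable (Spec_Signal_Checker genome L k step out) := by unfold Spec_Signal_Checker; infer_instance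

-- ===== CLAIM (what is proved, stated in full; the proofs are below) =====
def Claim_equal_Signal_Checker : Prop := ∀ (genome : String) (L : Int) (k : Int) (step : Int), Dom_Signal_Checker genome L k step → Pre_Signal_Checker genome L k step → Spec_Signal_Checker genome L k step (Signal_Checker genome L k step)


-- ===== LEMMAS AND PROOFS =====

-- the default LT/DecidableLT instances on List Char used by the ports coincide with the LinearOrder-derived ones
lemma pv_sorted_inst (xs : List (List Char)) (key : List Char → List Char) (rev : Bool) :
    @PySem.List.sorted _ _ List.instLT (fun a b => a.decidableLT b) xs key rev
      = @PySem.List.sorted _ _ List.instLinearOrder.toLT LinearOrder.toDecidableLT xs key rev := by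
  congr 1

-- counting helpers for the append step of the scan
lemma pv_count_concat_self (l : List (List Char)) (y : List Char) :
    List.count y (l ++ [y]) = List.count y l + 1 := by
  simp

lemma pv_count_concat_ne {c y : List Char} (h : c ≠ y) (l : List (List Char)) :
    List.count c (l ++ [y]) = List.count c l := by
  simp [List.count_append, Ne.symm h]

-- run-length scan over a sorted nonempty list: prev is the last element, run its count,
-- and best is the maximal multiplicity
lemma pv_scan_spec (Q : List (List Char)) (x : List Char)
    (hs : (Q ++ [x]).Pairwise (fun a b => a ≤ b)) :
    ((Q ++ [x]).foldl pvScanStep (0, 0, none)).2.2 = some x ∧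
    ((Q ++ [x]).foldl pvScanStep (0, 0, none)).2.1 = (List.count x (Q ++ [x]) : Int) ∧
    (∀ c ∈ Q ++ [x], (List.count c (Q ++ [x]) : Int) ≤ ((Q ++ [x]).foldl pvScanStep (0, 0, none)).1) ∧
    (∃ c ∈ Q ++ [x], ((Q ++ [x]).foldl pvScanStep (0, 0, none)).1 = (List.count c (Q ++ [x]) : Int)) := by
  induction Q using List.reverseRecOn generalizing x with
  | nil =>
      simp [pvScanStep]
  | append_singleton Q' y IH =>
      rw [List.pairwise_append] at hs
      obtain ⟨hQ, -, hle⟩ := hs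
      obtain ⟨hp, hr, hub, c0, hc0, hb0⟩ := IH y hQ
      have hfold : ((Q' ++ [y] ++ [x]).foldl pvScanStep (0, 0, none))
          = pvScanStep ((Q' ++ [y]).foldl pvScanStep (0, 0, none)) x := by
        rw [List.foldl_append]; rfl
      set st := (Q' ++ [y]).foldl pvScanStep (0, 0, none) with hst
      have hyQ : y ∈ Q' ++ [y] := by simp
      by_cases hxy : y = x
      · -- the new element extends the trailing run
        subst hxy
        have hcpos : 0 < List.count y (Q' ++ [y]) := List.count_pos_iff.2 hyQ
        have hcond : 0 < st.2.1 ∧ st.2.2 = some y := by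
          refine ⟨?_, hp⟩
          rw [hr]; exact_mod_cast hcpos
        have hstep : pvScanStep st y = (if st.1 < st.2.1 + 1 then st.2.1 + 1 else st.1, st.2.1 + 1, some y) := by
          simp [pvScanStep, hcond]
        have hcy : (List.count y (Q' ++ [y] ++ [y]) : Int) = st.2.1 + 1 := by
          rw [pv_count_concat_self, hr]; push_cast; ring
        refine ⟨by rw [hfold, hstep], by rw [hfold, hstep, hcy], ?_, ?_⟩
        · intro c hc
          rw [hfold, hstep]
          by_cases hcx : c = y
          · subst hcx
            rw [hcy]
            split <;> omega
          · rw [pv_count_concat_ne hcx]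
            have hcQ : c ∈ Q' ++ [y] := by
              rcases List.mem_append.1 hc with h | h
              · exact h
              · simp at h; exact absurd h hcx
            have := hub c hcQ
            split <;> omega
        · rw [hfold, hstep]
          by_cases hlt : st.1 < st.2.1 + 1
          · exact ⟨y, by simp, by rw [if_pos hlt, hcy]⟩
          · have hc0x : c0 ≠ y := by
              intro h; subst h
              rw [hb0, hr] at hlt; omega
            refine ⟨c0, List.mem_append_left _ hc0, ?_⟩
            rw [if_neg hlt, hb0, pv_count_concat_ne hc0x (Q' ++ [y])]
      · -- a fresh element: in a sorted list it cannot have occurred before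
        have hxQ : x ∉ Q' ++ [y] := by
          intro hx
          have hyx : y ≤ x := hle y hyQ x (by simp)
          have hxy' : x ≤ y := by
            rw [List.pairwise_append] at hQ
            rcases List.mem_append.1 hx with h | h
            · exact hQ.2.2 x h y (by simp)
            · simp at h; exact absurd h (fun hh => hxy hh.symm)
          exact hxy (le_antisymm hyx hxy')
        have hcond : ¬ (0 < st.2.1 ∧ st.2.2 = some x) := by
          rw [hp]; intro h; exact hxy (Option.some_inj.1 h.2)
        have hbpos : (1 : Int) ≤ st.1 := by
          rw [hb0]
          have : 0 < List.count c0 (Q' ++ [y]) := List.count_pos_iff.2 hc0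
          exact_mod_cast this
        have hstep : pvScanStep st x = (st.1, 1, some x) := by
          simp only [pvScanStep, if_neg hcond]
          rw [if_neg (by omega)]
        have hcx1 : (List.count x (Q' ++ [y] ++ [x]) : Int) = 1 := by
          rw [List.count_append, List.count_eq_zero.2 hxQ]; simp
        refine ⟨by rw [hfold, hstep], by rw [hfold, hstep, hcx1], ?_, ?_⟩
        · intro c hc
          rw [hfold, hstep]
          by_cases hcx : c = x
          · subst hcx; rw [hcx1]; exact hbpos
          · have hcQ : c ∈ Q' ++ [y] := by
              rcases List.mem_append.1 hc with h | h
              · exact h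
              · simp at h; exact absurd h hcx
            rw [pv_count_concat_ne hcx]
            exact hub c hcQ
        · rw [hfold, hstep]
          have hc0x : c0 ≠ x := fun h => hxQ (h ▸ hc0)
          exact ⟨c0, List.mem_append_left _ hc0, by rw [hb0, pv_count_concat_ne hc0x]⟩

-- A's dict-based top frequency: it is a count and bounds all counts
lemma pv_A_max (kmers : List (List Char)) (hne : kmers ≠ []) :
    ∃ m, (PySem.List.max? (PySem.Dict.counter kmers).values (fun v => v)).getD 0 = m ∧
      (∀ c ∈ kmers, (List.count c kmers : Int) ≤ m) ∧ ∃ c ∈ kmers, m = (List.count c kmers : Int) := by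
  have hvals : (PySem.Dict.counter kmers).values =
      (PySem.Set.ofList kmers).map (fun c => ((List.count c kmers : Nat) : Int)) := by
    rw [PySem.Dict.values_eq_map_keys (PySem.Dict.counter kmers) (PySem.Dict.nodup_keys_counter kmers) 0,
        PySem.Dict.keys_counter]
    exact List.map_congr_left (fun c _ => PySem.Dict.getD_counter kmers c)
  have hvne : (PySem.Dict.counter kmers).values ≠ [] := by
    rw [hvals]
    simp only [ne_eq, List.map_eq_nil_iff]
    intro hnil
    rcases List.exists_mem_of_ne_nil kmers hne with ⟨c, hc⟩
    have hmem := (PySem.Set.mem_ofList kmers c).2 hc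
    rw [hnil] at hmem
    exact absurd hmem (by simp)
  obtain ⟨m, hm⟩ : ∃ m, PySem.List.max? (PySem.Dict.counter kmers).values (fun v => v) = some m := by
    cases hmx : PySem.List.max? (PySem.Dict.counter kmers).values (fun v => v) with
    | none => exact absurd ((PySem.List.max?_eq_none_iff _ _).1 hmx) hvne
    | some m => exact ⟨m, rfl⟩
  refine ⟨m, by rw [hm]; rfl, ?_, ?_⟩
  · intro c hc
    refine PySem.List.max?_isMax hm _ ?_
    rw [hvals]
    exact List.mem_map.2 ⟨c, (PySem.Set.mem_ofList kmers c).2 hc, rfl⟩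
  · have := PySem.List.max?_mem hm
    rw [hvals] at this
    rcases List.mem_map.1 this with ⟨c, hc, rfl⟩
    exact ⟨c, (PySem.Set.mem_ofList kmers c).1 hc, rfl⟩

-- per-window: A's dict-based top frequency equals B's longest sorted run
lemma pv_window_eq (window : List Char) (k : Int) (hk : k + 1 ≤ (window.length : Int)) :
    (PySem.List.max?
      ((PySem.List.pyRange 0 ((window.length : Int) - k) 1).foldl
        (fun d j =>
          let currK := PySem.List.slice window (some j) (some (j + k))
          if d.contains currK then d.insert currK (d.getD currK 0 + 1)
          else d.insert currK 1)
        PySem.Dict.empty).values (fun v => v)).getD 0 =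
    ((PySem.List.sorted ((PySem.List.pyRange 0 ((window.length : Int) - k) 1).map
        (fun j => PySem.List.slice window (some j) (some (j + k)))) (fun x => x) false).foldl
      pvScanStep (0, 0, none)).1 := by
  set kmers : List (List Char) :=
    (PySem.List.pyRange 0 ((window.length : Int) - k) 1).map
      (fun j => PySem.List.slice window (some j) (some (j + k))) with hkm
  have hne : kmers ≠ [] := by
    rw [hkm]
    simp only [ne_eq, List.map_eq_nil_iff]
    intro hnil
    have := congrArg List.length hnil
    rw [PySem.List.length_pyRange_one] at this
    simp at this
    omega
  -- A's fold is the counter of the k-mer list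
  have hfold :
      (PySem.List.pyRange 0 ((window.length : Int) - k) 1).foldl
        (fun d j =>
          let currK := PySem.List.slice window (some j) (some (j + k))
          if d.contains currK then d.insert currK (d.getD currK 0 + 1)
          else d.insert currK 1)
        PySem.Dict.empty =
      PySem.Dict.counter kmers := by
    rw [hkm, ← PySem.Dict.foldl_insert_getD_add_one_eq_counter, List.foldl_map]
    apply PySem.List.foldl_congr_mem
    intro d j _
    simp only
    by_cases hc : d.contains (PySem.List.slice window (some j) (some (j + k)))
    · simp [hc]
    · simp only [Bool.not_eq_true] at hc
      simp [hc, PySem.Dict.getD_of_not_contains d 0 hc]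
  rw [hfold]
  obtain ⟨m, hmeq, hub, c1, hc1, hc1e⟩ := pv_A_max kmers hne
  rw [hmeq]
  -- B's sorted scan
  set zs := PySem.List.sorted kmers (fun x => x) false with hzs
  have hperm : zs.Perm kmers := PySem.List.sorted_perm kmers (fun x => x) false
  have hzne : zs ≠ [] := by
    intro h
    exact hne ((PySem.List.sorted_eq_nil_iff kmers (fun x => x) false).1 h)
  rcases (List.eq_nil_or_concat zs) with h | ⟨Q, x, hQx⟩
  · exact absurd h hzne
  rw [List.concat_eq_append] at hQx
  have hpw : (Q ++ [x]).Pairwise (fun a b => a ≤ b) := by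
    rw [← hQx, hzs, pv_sorted_inst]
    exact PySem.List.sorted_pairwise kmers (fun x => x)
  obtain ⟨-, -, hub', c2, hc2, hc2e⟩ := pv_scan_spec Q x hpw
  rw [hQx]
  have hcount : ∀ c, List.count c (Q ++ [x]) = List.count c kmers := by
    intro c
    rw [← hQx]
    exact hperm.count_eq c
  apply le_antisymm
  · rw [hc1e, ← hcount c1]
    refine hub' c1 ?_
    rw [← hQx]
    exact hperm.mem_iff.2 hc1
  · rw [hc2e, hcount c2]
    refine hub c2 ?_
    refine hperm.mem_iff.1 ?_
    rw [hQx]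
    exact hc2

-- ===== VERDICT (by name: the statement is the Claim_ definition above) =====
theorem Signal_Checker_spec : Claim_equal_Signal_Checker := by
  intro genome L k step _ hpre
  unfold Spec_Signal_Checker Signal_Checker Signal_Checker_alt
  apply PySem.List.foldl_congr_mem
  intro acc i hi
  have h := pv_window_eq (PySem.List.slice genome.toList (some i) (some (i + L))) k (hpre.2 i hi)
  simp only at h ⊢
  rw [h]
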